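-- pv_equiv track=rewrite | github.com/rassul3003/ds_and_algorithms | 2395-find-subarrays-with-equal-sum.py | findSubarrays_bruteforce
-- ===== SOURCE A (Python) =====
-- def findSubarrays_bruteforce(nums):
--     sums = []
--     for i in range(len(nums)-1):
--         # if sum(nums[i:i+2]) in sums     is also possible, but might be hard to read
--         if nums[i] + nums[i+1] in sums:
--             return True
--         else:
--             sums.append(nums[i] + nums[i+1])
--
--     return False
-- ===== SOURCE B (Python) =====
-- def findSubarrays_bruteforce(nums):
--     sums = sorted(a + b for a, b in zip(nums, nums[1:]))
--     return any(x == y for x, y in zip(sums, sums[1:]))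
-- ===== Notes on version B (the rewrite author's own statement) =====
-- stated objective: simpler
-- what changed: Replaces A's incremental membership-test-with-early-exit loop by a two-phase collect-all-pair-sums, sort, then single adjacent-equality scan.
import Mathlib
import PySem

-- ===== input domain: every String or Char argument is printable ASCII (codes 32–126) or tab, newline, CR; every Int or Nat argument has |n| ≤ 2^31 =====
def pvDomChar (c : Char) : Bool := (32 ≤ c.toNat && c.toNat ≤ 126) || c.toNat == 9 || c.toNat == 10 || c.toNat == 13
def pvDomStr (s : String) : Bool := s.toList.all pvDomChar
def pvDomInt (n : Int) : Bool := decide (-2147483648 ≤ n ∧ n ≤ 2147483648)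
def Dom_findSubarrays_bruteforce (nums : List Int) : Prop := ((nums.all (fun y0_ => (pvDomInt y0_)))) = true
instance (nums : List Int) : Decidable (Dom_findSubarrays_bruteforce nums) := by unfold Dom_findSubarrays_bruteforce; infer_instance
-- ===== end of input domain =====

-- B replaces A's incremental membership-test loop (with early exit) by a simpler two-phase
-- collect-all-pair-sums / sort / adjacent-equality scan.


-- ===== PORT A =====
-- the for-loop with early return: state is the accumulated `sums` list
def pvGoA (nums : List Int) (sums : List Int) : List Int → Bool
  | [] => false
  | i :: rest =>
    -- nums[i] + nums[i+1]; i is always in range here, so the default of pyGetD is never used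
    if sums.contains (PySem.List.pyGetD nums i 0 + PySem.List.pyGetD nums (i + 1) 0) then
      true
    else
      pvGoA nums (sums ++ [PySem.List.pyGetD nums i 0 + PySem.List.pyGetD nums (i + 1) 0]) rest

def findSubarrays_bruteforce (nums : List Int) : Bool :=
  pvGoA nums [] (PySem.List.pyRange 0 ((nums.length : Int) - 1) 1)

-- ===== PORT B =====
def findSubarrays_bruteforce_alt (nums : List Int) : Bool :=
  let sums := PySem.List.sorted
    ((nums.zip (PySem.List.slice nums (some 1) none)).map (fun p => p.1 + p.2))
    (fun x => x) false
  (sums.zip (PySem.List.slice sums (some 1) none)).any (fun p => p.1 == p.2)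

-- ===== PRECONDITION & SPEC =====
def Spec_findSubarrays_bruteforce (nums : List Int) (out : Bool) : Prop := out = findSubarrays_bruteforce_alt nums
instance (nums : List Int) (out : Bool) : Decidable (Spec_findSubarrays_bruteforce nums out) := by unfold Spec_findSubarrays_bruteforce; infer_instance

-- ===== CLAIM (what is proved, stated in full; the proofs are below) =====
def Claim_equal_findSubarrays_bruteforce : Prop := ∀ (nums : List Int), Dom_findSubarrays_bruteforce nums → Spec_findSubarrays_bruteforce nums (findSubarrays_bruteforce nums)

-- ===== LEMMAS AND PROOFS =====

-- A's loop detects exactly "some duplicate among the visited pair sums"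
theorem pvGoA_eq (nums : List Int) (is : List Int) :
    ∀ (sums : List Int), sums.Nodup →
      pvGoA nums sums is
        = !decide (sums ++ is.map
            (fun i => PySem.List.pyGetD nums i 0 + PySem.List.pyGetD nums (i + 1) 0)).Nodup := by
  induction is with
  | nil => intro sums h; simp [pvGoA, h]
  | cons i rest ih =>
    intro sums h
    by_cases hmem : (PySem.List.pyGetD nums i 0 + PySem.List.pyGetD nums (i + 1) 0) ∈ sums
    · simp only [pvGoA]
      rw [if_pos (by simpa using hmem)]
      have hnd : ¬ (sums ++ (PySem.List.pyGetD nums i 0 + PySem.List.pyGetD nums (i + 1) 0)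
          :: rest.map (fun i => PySem.List.pyGetD nums i 0 + PySem.List.pyGetD nums (i + 1) 0)).Nodup := by
        rw [List.nodup_append]
        rintro ⟨-, -, hd⟩
        exact hd _ hmem _ (by simp) rfl
      simp [hnd]
    · simp only [pvGoA]
      rw [if_neg (by simpa using hmem)]
      have hnd : (sums ++ [PySem.List.pyGetD nums i 0 + PySem.List.pyGetD nums (i + 1) 0]).Nodup := by
        rw [List.nodup_append]
        refine ⟨h, List.nodup_singleton _, ?_⟩
        intro a ha b hb
        simp only [List.mem_singleton] at hb
        subst hb
        exact fun e => hmem (e ▸ ha)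
      rw [ih _ hnd]
      simp

-- the adjacent-equality scan on a ≤-sorted list detects exactly "not Nodup"
theorem pvAdjScan_eq : ∀ (l : List Int), l.Pairwise (· ≤ ·) →
    (l.zip l.tail).any (fun p => p.1 == p.2) = !decide l.Nodup := by
  intro l
  induction l with
  | nil => intro _; simp
  | cons a t ih =>
    intro hp
    cases t with
    | nil => simp
    | cons b t' =>
      have hab : a ≤ b := (List.pairwise_cons.1 hp).1 _ (by simp)
      have hpt : (b :: t').Pairwise (· ≤ ·) := (List.pairwise_cons.1 hp).2
      by_cases hEq : a = b
      · subst hEq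
        simp [List.any_cons]
      · have halt : a ∉ b :: t' := by
          intro hmem
          rcases List.mem_cons.1 hmem with h1 | h2
          · exact hEq h1
          · have : b ≤ a := (List.pairwise_cons.1 hpt).1 _ h2
            exact hEq (le_antisymm hab this)
        have := ih hpt
        simp only [List.tail_cons, List.zip_cons_cons, List.any_cons] at this ⊢
        rw [this]
        simp [List.nodup_cons, halt, hEq]

-- A's pair-sum list (indexed form) is B's pair-sum list (zip form)
theorem pvSums_eq (nums : List Int) :
    (PySem.List.pyRange 0 ((nums.length : Int) - 1) 1).map
        (fun i => PySem.List.pyGetD nums i 0 + PySem.List.pyGetD nums (i + 1) 0)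
      = (nums.zip nums.tail).map (fun p => p.1 + p.2) := by
  cases nums with
  | nil => simp [PySem.List.pyRange_one_eq_nil]
  | cons a t =>
    apply List.ext_getElem
    · simp [PySem.List.length_pyRange_one]
    · intro k h1 h2
      have hk : k < t.length := by
        simpa [PySem.List.length_pyRange_one] using h1
      simp only [List.getElem_map, PySem.List.getElem_pyRange_one, zero_add]
      have e2 : ((k : Int) + 1) = (((k + 1 : Nat)) : Int) := by push_cast; ring
      rw [e2, PySem.List.pyGetD_natCast, PySem.List.pyGetD_natCast,
        List.getD_eq_getElem _ _ (by simp; omega), List.getD_eq_getElem _ _ (by simp; omega)]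
      simp [List.getElem_zip]

-- ===== VERDICT (by name: the statement is the Claim_ definition above) =====
theorem findSubarrays_bruteforce_spec : Claim_equal_findSubarrays_bruteforce := by
  intro nums _
  unfold Spec_findSubarrays_bruteforce findSubarrays_bruteforce findSubarrays_bruteforce_alt
  rw [pvGoA_eq nums _ [] List.nodup_nil, pvSums_eq]
  rw [PySem.List.slice_from_one]
  set sums := (nums.zip nums.tail).map (fun p => p.1 + p.2) with hs
  show (!decide ([] ++ sums).Nodup)
      = ((PySem.List.sorted sums (fun x => x) false).zip
          (PySem.List.slice (PySem.List.sorted sums (fun x => x) false) (some 1) none)).any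
        (fun p => p.1 == p.2)
  rw [PySem.List.slice_from_one]
  rw [pvAdjScan_eq _ (by simpa using PySem.List.sorted_pairwise sums (fun x => x))]
  have hperm := PySem.List.sorted_perm sums (fun x => x) false
  simp [hperm.nodup_iff]
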